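-- pv_equiv track=rewrite | github.com/hakver29/project_euler | python/problem78.py | calculateNext
-- ===== SOURCE A (Python) =====
-- def calculateNext(L, n):
--     N = 0
--     k = 1
--     index = 0
--     while index >= 0:
--         index = n - (k * (3 * k - 1)) // 2 - 1
--         if index >= 0:
--             N += pow(-1, k - 1)*L[index]
--         k = k + 1
--
--     k = 1
--     index = 0
--     while index >= 0:
--         index = n - (k * (3 * k + 1)) // 2 - 1
--         if index >= 0:
--             N += pow(-1, k - 1) * L[index]
--         k = k + 1
--
--     return N
-- ===== SOURCE B (Python) =====
-- def _isqrt(m):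
--     x = m
--     y = (x + 1) // 2
--     while y < x:
--         x = y
--         y = (x + m // x) // 2
--     return x
--
-- def calculateNext(L, n):
--     total = 0
--     i = n - 2
--     while i >= 0:
--         g = n - 1 - i
--         s = _isqrt(24 * g + 1)
--         if s * s == 24 * g + 1:
--             r = s % 6
--             if r == 5:
--                 k = (s + 1) // 6
--                 total += (-1) ** (k - 1) * L[i]
--             elif r == 1:
--                 k = (s - 1) // 6
--                 total += (-1) ** (k - 1) * L[i]
--         i -= 1
--     return total
-- ===== Notes on version B (the rewrite author's own statement) =====
-- stated objective: alternative
-- what changed: Instead of generating the pentagonal numbers k-by-k in two while-loops as A does, B scans the list indices i = n-2..0 and recognizes whether the offset g = n-1-i is a generalized pentagonal number by a perfect-square test (24g+1 = s^2 with s % 6 = 5 or 1) using its own Newton integer square root, recovering k and the sign from s.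
import Mathlib
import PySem

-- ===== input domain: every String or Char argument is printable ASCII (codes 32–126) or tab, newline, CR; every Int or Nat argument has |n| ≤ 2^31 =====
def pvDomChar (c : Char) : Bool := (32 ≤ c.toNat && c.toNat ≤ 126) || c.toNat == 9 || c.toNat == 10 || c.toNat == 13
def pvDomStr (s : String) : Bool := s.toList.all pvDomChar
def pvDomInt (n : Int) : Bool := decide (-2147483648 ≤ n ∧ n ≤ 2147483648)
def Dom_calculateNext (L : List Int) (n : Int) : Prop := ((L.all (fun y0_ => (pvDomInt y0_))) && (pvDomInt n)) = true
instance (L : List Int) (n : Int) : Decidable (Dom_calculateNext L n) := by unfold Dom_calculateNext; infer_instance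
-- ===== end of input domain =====

-- One honest line: instead of generating pentagonal numbers k-by-k as A does, B scans the
-- list indices and recognizes pentagonal offsets by a perfect-square test (24g+1 = s^2,
-- s ≡ ±1 mod 6) with its own Newton integer square root; objective: a different algorithm.

-- shared arithmetic helper: the two pentagonal offsets k*(3k∓1)//2 (Python //)
def pent1 (k : Nat) : Int := PySem.Int.floordiv ((k : Int) * (3 * (k : Int) - 1)) 2
def pent2 (k : Nat) : Int := PySem.Int.floordiv ((k : Int) * (3 * (k : Int) + 1)) 2

theorem floordiv_double (t : Int) : PySem.Int.floordiv (2 * t) 2 = t := by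
  rw [PySem.Int.floordiv_eq_iff_of_pos (by norm_num)]
  constructor <;> linarith

theorem pent1_two (k : Nat) : pent1 k * 2 = (k : Int) * (3 * (k : Int) - 1) := by
  obtain ⟨t, ht⟩ : ∃ t : Int, (k : Int) * (3 * (k : Int) - 1) = 2 * t := by
    rcases Int.even_or_odd (k : Int) with ⟨m, hm⟩ | ⟨m, hm⟩
    · exact ⟨m * (6 * m - 1), by rw [hm]; ring⟩
    · exact ⟨(2 * m + 1) * (3 * m + 1), by rw [hm]; ring⟩
  unfold pent1
  rw [ht, floordiv_double]
  ring

theorem pent2_two (k : Nat) : pent2 k * 2 = (k : Int) * (3 * (k : Int) + 1) := by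
  obtain ⟨t, ht⟩ : ∃ t : Int, (k : Int) * (3 * (k : Int) + 1) = 2 * t := by
    rcases Int.even_or_odd (k : Int) with ⟨m, hm⟩ | ⟨m, hm⟩
    · exact ⟨m * (6 * m + 1), by rw [hm]; ring⟩
    · exact ⟨(2 * m + 1) * (3 * m + 2), by rw [hm]; ring⟩
  unfold pent2
  rw [ht, floordiv_double]
  ring

theorem pent1_succ (k : Nat) : pent1 (k + 1) = pent1 k + 3 * k + 1 := by
  have h1 := pent1_two k
  have h2 := pent1_two (k + 1)
  push_cast at h2
  nlinarith [h1, h2]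

theorem pent2_succ (k : Nat) : pent2 (k + 1) = pent2 k + 3 * k + 2 := by
  have h1 := pent2_two k
  have h2 := pent2_two (k + 1)
  push_cast at h2
  nlinarith [h1, h2]

-- ===== PORT A =====
-- first while loop: accumulate pow(-1, k-1) * L[n - k*(3k-1)//2 - 1] while that index is ≥ 0
def loopA1 (L : List Int) (n : Int) (k : Nat) (N : Int) : Int :=
  if 0 ≤ n - pent1 k - 1 then
    loopA1 L n (k + 1) (N + (-1 : Int) ^ (k - 1) * PySem.List.pyGetD L (n - pent1 k - 1) 0)
  else N
termination_by (n + 1 - pent1 k).toNat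
decreasing_by simp only [pent1_succ]; omega

-- second while loop, with offset k*(3k+1)//2
def loopA2 (L : List Int) (n : Int) (k : Nat) (N : Int) : Int :=
  if 0 ≤ n - pent2 k - 1 then
    loopA2 L n (k + 1) (N + (-1 : Int) ^ (k - 1) * PySem.List.pyGetD L (n - pent2 k - 1) 0)
  else N
termination_by (n + 1 - pent2 k).toNat
decreasing_by simp only [pent2_succ]; omega

def calculateNext (L : List Int) (n : Int) : Int :=
  loopA2 L n 1 (loopA1 L n 1 0)

-- ===== PORT B =====
-- Newton iteration for the integer square root (Source B's _isqrt): x = m; y = (x+1)//2;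
-- while y < x: x = y; y = (x + m//x)//2.  The extra '0 ≤ y' conjunct is a totality
-- guard only: every state Source B actually reaches has y ≥ 1 (it is called with m ≥ 25).
def isqrtLoop (m x y : Int) : Int :=
  if _h : y < x ∧ 0 ≤ y then
    isqrtLoop m y (PySem.Int.floordiv (y + PySem.Int.floordiv m y) 2)
  else x
termination_by x.toNat
decreasing_by omega

def pyIsqrt (m : Int) : Int := isqrtLoop m m (PySem.Int.floordiv (m + 1) 2)

-- Source B's main loop: i from n-2 down to 0; g = n-1-i; if 24g+1 is a perfect square s^2
-- with s % 6 = 5 (resp. 1) then g is pentagonal of k = (s+1)//6 (resp. (s-1)//6) and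
-- sign*(L[i]) is added.  k ≥ 1 on every executed path (s ≥ 5), so .toNat is exact.
def loopB (L : List Int) (n : Int) (i : Int) (total : Int) : Int :=
  if 0 ≤ i then
    loopB L n (i - 1)
      (let g := n - 1 - i
       let s := pyIsqrt (24 * g + 1)
       if s * s = 24 * g + 1 then
         let r := PySem.Int.mod s 6
         if r = 5 then
           total + (-1 : Int) ^ ((PySem.Int.floordiv (s + 1) 6 - 1).toNat) * PySem.List.pyGetD L i 0
         else if r = 1 then
           total + (-1 : Int) ^ ((PySem.Int.floordiv (s - 1) 6 - 1).toNat) * PySem.List.pyGetD L i 0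
         else total
       else total)
  else total
termination_by (i + 1).toNat
decreasing_by omega

def calculateNext_alt (L : List Int) (n : Int) : Int :=
  loopB L n (n - 2) 0

-- ===== PRECONDITION & SPEC =====
-- Pre_ excludes exactly the inputs where Python A raises IndexError (first probed index n-2
-- is nonnegative but out of range; B's Python raises there too, so nothing is claimed there).
def Pre_calculateNext (L : List Int) (n : Int) : Prop := n ≤ (L.length : Int) + 1
instance (L : List Int) (n : Int) : Decidable (Pre_calculateNext L n) := by
  unfold Pre_calculateNext; infer_instance
def pvWitness_calculateNext : List Int × Int := ([1, 1, 2, 3, 5], 5)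

def Spec_calculateNext (L : List Int) (n : Int) (out : Int) : Prop := out = calculateNext_alt L n
instance (L : List Int) (n : Int) (out : Int) : Decidable (Spec_calculateNext L n out) := by
  unfold Spec_calculateNext; infer_instance

-- ===== CLAIM (what is proved, stated in full; the proofs are below) =====
def Claim_equal_calculateNext : Prop := ∀ (L : List Int) (n : Int), Dom_calculateNext L n → Pre_calculateNext L n → Spec_calculateNext L n (calculateNext L n)

-- ===== LEMMAS AND PROOFS =====

-- floor-division bounds, used throughout
theorem fd_bounds (a b : Int) (hb : 0 < b) :
    (PySem.Int.floordiv a b) * b ≤ a ∧ a < (PySem.Int.floordiv a b + 1) * b :=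
  (PySem.Int.floordiv_eq_iff_of_pos hb).mp rfl

-- one Newton step never undershoots any integer square root
theorem newton_ge (m x s : Int) (hx : 1 ≤ x) (hs : 0 ≤ s) (hsm : s * s ≤ m) :
    s ≤ PySem.Int.floordiv (x + PySem.Int.floordiv m x) 2 := by
  obtain ⟨h1, h2⟩ := fd_bounds m x (by omega)
  obtain ⟨h3, h4⟩ := fd_bounds (x + PySem.Int.floordiv m x) 2 (by norm_num)
  nlinarith [sq_nonneg (x - s)]

theorem isqrtLoop_correct (m : Int) (hm : 1 ≤ m) :
    ∀ (f : Nat) (x : Int), x.toNat ≤ f → 1 ≤ x →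
      (∀ s : Int, 0 ≤ s → s * s ≤ m → s ≤ x) →
      (isqrtLoop m x (PySem.Int.floordiv (x + PySem.Int.floordiv m x) 2)) *
        (isqrtLoop m x (PySem.Int.floordiv (x + PySem.Int.floordiv m x) 2)) ≤ m ∧
      m < (isqrtLoop m x (PySem.Int.floordiv (x + PySem.Int.floordiv m x) 2) + 1) *
        (isqrtLoop m x (PySem.Int.floordiv (x + PySem.Int.floordiv m x) 2) + 1) := by
  intro f
  induction f with
  | zero => intro x hf hx _; omega
  | succ f ih =>
    intro x hf hx hinv
    set y := PySem.Int.floordiv (x + PySem.Int.floordiv m x) 2 with hy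
    have hy1 : 1 ≤ y := by
      have := newton_ge m x 1 hx (by norm_num) (by nlinarith)
      omega
    have hyinv : ∀ s : Int, 0 ≤ s → s * s ≤ m → s ≤ y := fun s hs hsm =>
      newton_ge m x s hx hs hsm
    rw [isqrtLoop]
    by_cases hlt : y < x
    · rw [dif_pos ⟨hlt, by omega⟩]
      exact ih y (by omega) hy1 hyinv
    · rw [dif_neg (by omega)]
      constructor
      · obtain ⟨h1, h2⟩ := fd_bounds m x (by omega)
        obtain ⟨h3, h4⟩ := fd_bounds (x + PySem.Int.floordiv m x) 2 (by norm_num)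
        nlinarith
      · by_contra hcon
        have := hinv (x + 1) (by omega) (by omega)
        omega

theorem pyIsqrt_correct (m : Int) (hm : 1 ≤ m) :
    pyIsqrt m * pyIsqrt m ≤ m ∧ m < (pyIsqrt m + 1) * (pyIsqrt m + 1) := by
  have hdm : PySem.Int.floordiv m m = 1 := by
    rw [PySem.Int.floordiv_eq_iff_of_pos (by omega)]
    constructor <;> nlinarith
  have h : pyIsqrt m
      = isqrtLoop m m (PySem.Int.floordiv (m + PySem.Int.floordiv m m) 2) := by
    unfold pyIsqrt; rw [hdm]
  rw [h]
  exact isqrtLoop_correct m hm m.toNat m le_rfl hm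
    (fun s _hs hsm => by nlinarith)

theorem sqrt_unique (m s t : Int) (_hs : 0 ≤ s) (h1 : s * s ≤ m) (h2 : m < (s + 1) * (s + 1))
    (ht : 0 ≤ t) (h3 : t * t = m) : t = s := by
  have ha : t < s + 1 := by nlinarith
  have hb : s ≤ t := by nlinarith
  omega

theorem pent1_mono {a b : Nat} (h : a < b) : pent1 a < pent1 b := by
  have h1 := pent1_two a
  have h2 := pent1_two b
  have hc : (a : Int) < b := by exact_mod_cast h
  nlinarith

theorem pent2_mono {a b : Nat} (h : a < b) : pent2 a < pent2 b := by
  have h1 := pent2_two a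
  have h2 := pent2_two b
  have hc : (a : Int) < b := by exact_mod_cast h
  nlinarith

-- 24*pent + 1 is the square of 6k∓1
theorem pent1_sq (k : Nat) : 24 * pent1 k + 1 = (6 * (k : Int) - 1) * (6 * (k : Int) - 1) := by
  have := pent1_two k; nlinarith

theorem pent2_sq (k : Nat) : 24 * pent2 k + 1 = (6 * (k : Int) + 1) * (6 * (k : Int) + 1) := by
  have := pent2_two k; nlinarith

-- accumulator extraction for A's loops
theorem loopA1_acc (L : List Int) (n : Int) (k : Nat) (N : Int) :
    loopA1 L n k N = N + loopA1 L n k 0 := by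
  have H : ∀ (m k : Nat) (N : Int), (n + 1 - pent1 k).toNat ≤ m →
      loopA1 L n k N = N + loopA1 L n k 0 := by
    intro m
    induction m with
    | zero =>
      intro k N hm
      have h : ¬ 0 ≤ n - pent1 k - 1 := by omega
      conv_lhs => rw [loopA1]
      conv_rhs => rw [loopA1]
      rw [if_neg h, if_neg h]
      ring
    | succ m ih =>
      intro k N hm
      conv_lhs => rw [loopA1]
      conv_rhs => rw [loopA1]
      by_cases h : 0 ≤ n - pent1 k - 1
      · have hm' : (n + 1 - pent1 (k + 1)).toNat ≤ m := by
          have := pent1_succ k; omega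
        have e1 := ih (k + 1) (N + (-1 : Int) ^ (k - 1) * PySem.List.pyGetD L (n - pent1 k - 1) 0) hm'
        have e2 := ih (k + 1) ((0 : Int) + (-1 : Int) ^ (k - 1) * PySem.List.pyGetD L (n - pent1 k - 1) 0) hm'
        rw [if_pos h, if_pos h, e1, e2]
        ring
      · rw [if_neg h, if_neg h]; ring
  exact H _ k N le_rfl

theorem loopA2_acc (L : List Int) (n : Int) (k : Nat) (N : Int) :
    loopA2 L n k N = N + loopA2 L n k 0 := by
  have H : ∀ (m k : Nat) (N : Int), (n + 1 - pent2 k).toNat ≤ m →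
      loopA2 L n k N = N + loopA2 L n k 0 := by
    intro m
    induction m with
    | zero =>
      intro k N hm
      have h : ¬ 0 ≤ n - pent2 k - 1 := by omega
      conv_lhs => rw [loopA2]
      conv_rhs => rw [loopA2]
      rw [if_neg h, if_neg h]
      ring
    | succ m ih =>
      intro k N hm
      conv_lhs => rw [loopA2]
      conv_rhs => rw [loopA2]
      by_cases h : 0 ≤ n - pent2 k - 1
      · have hm' : (n + 1 - pent2 (k + 1)).toNat ≤ m := by
          have := pent2_succ k; omega
        have e1 := ih (k + 1) (N + (-1 : Int) ^ (k - 1) * PySem.List.pyGetD L (n - pent2 k - 1) 0) hm'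
        have e2 := ih (k + 1) ((0 : Int) + (-1 : Int) ^ (k - 1) * PySem.List.pyGetD L (n - pent2 k - 1) 0) hm'
        rw [if_pos h, if_pos h, e1, e2]
        ring
      · rw [if_neg h, if_neg h]; ring
  exact H _ k N le_rfl


-- the zeta-expanded body of one loopB iteration (proof-side helper)
def bodyB (L : List Int) (n i total : Int) : Int :=
  if pyIsqrt (24 * (n - 1 - i) + 1) * pyIsqrt (24 * (n - 1 - i) + 1) = 24 * (n - 1 - i) + 1 then
    if PySem.Int.mod (pyIsqrt (24 * (n - 1 - i) + 1)) 6 = 5 then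
      total + (-1 : Int) ^ ((PySem.Int.floordiv (pyIsqrt (24 * (n - 1 - i) + 1) + 1) 6 - 1).toNat) * PySem.List.pyGetD L i 0
    else if PySem.Int.mod (pyIsqrt (24 * (n - 1 - i) + 1)) 6 = 1 then
      total + (-1 : Int) ^ ((PySem.Int.floordiv (pyIsqrt (24 * (n - 1 - i) + 1) - 1) 6 - 1).toNat) * PySem.List.pyGetD L i 0
    else total
  else total

theorem loopB_step (L : List Int) (n i t : Int) (hi : 0 ≤ i) :
    loopB L n i t = loopB L n (i - 1) (bodyB L n i t) := by
  rw [loopB, if_pos hi]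
  rfl

theorem pent1_le {a b : Nat} (h : a ≤ b) : pent1 a ≤ pent1 b := by
  rcases Nat.lt_or_ge a b with h' | h'
  · exact le_of_lt (pent1_mono h')
  · have : a = b := le_antisymm h h'
    simp [this]

theorem pent2_le {a b : Nat} (h : a ≤ b) : pent2 a ≤ pent2 b := by
  rcases Nat.lt_or_ge a b with h' | h'
  · exact le_of_lt (pent2_mono h')
  · have : a = b := le_antisymm h h'
    simp [this]

theorem pent1_nonneg (k : Nat) : 0 ≤ pent1 k := by
  cases k with
  | zero => decide
  | succ j =>
    have h := pent1_two (j + 1)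
    push_cast at h
    nlinarith [Int.natCast_nonneg j]

theorem loopB_stop (L : List Int) (n i : Int) (k1 k2 : Nat) (t : Int) (hi : i < 0)
    (b2 : n - 1 - i ≤ pent1 k1) (b4 : n - 1 - i ≤ pent2 k2) :
    loopB L n i t = t + loopA1 L n k1 0 + loopA2 L n k2 0 := by
  rw [loopB, if_neg (by omega)]
  have e1 : loopA1 L n k1 0 = 0 := by rw [loopA1, if_neg (by omega)]
  have e2 : loopA2 L n k2 0 = 0 := by rw [loopA2, if_neg (by omega)]
  rw [e1, e2]; ring

set_option maxHeartbeats 2000000 in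
-- the fused B loop from index i equals the two remaining A loops from k1, k2
theorem loopB_eq (L : List Int) (n : Int) :
    ∀ (f : Nat) (i : Int) (k1 k2 : Nat) (t : Int),
      (i + 1).toNat ≤ f → 1 ≤ k1 → 1 ≤ k2 →
      pent1 (k1 - 1) < n - 1 - i → n - 1 - i ≤ pent1 k1 →
      pent2 (k2 - 1) < n - 1 - i → n - 1 - i ≤ pent2 k2 →
      loopB L n i t = t + loopA1 L n k1 0 + loopA2 L n k2 0 := by
  intro f
  induction f with
  | zero =>
    intro i k1 k2 t hf hk1 hk2 b1 b2 b3 b4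
    exact loopB_stop L n i k1 k2 t (by omega) b2 b4
  | succ f ih =>
    intro i k1 k2 t hf hk1 hk2 b1 b2 b3 b4
    by_cases hi : 0 ≤ i
    case neg => exact loopB_stop L n i k1 k2 t (by omega) b2 b4
    case pos =>
    have hg1 : 1 ≤ n - 1 - i := by have := pent1_nonneg (k1 - 1); omega
    have hm25 : 25 ≤ 24 * (n - 1 - i) + 1 := by omega
    obtain ⟨hs1, hs2⟩ := pyIsqrt_correct (24 * (n - 1 - i) + 1) (by omega)
    set g : Int := n - 1 - i with hgdef
    set s : Int := pyIsqrt (24 * g + 1) with hsdef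
    have hs0 : 0 ≤ s := by nlinarith
    have hs5 : 5 ≤ s := by nlinarith
    have hmod : PySem.Int.mod s 6 = s % 6 := PySem.Int.mod_eq_emod_of_pos (by norm_num)
    rw [loopB_step L n i t hi]
    have hf' : (i - 1 + 1).toNat ≤ f := by omega
    by_cases hp1 : g = pent1 k1
    · -- this index is the k1-th first-family pentagonal term
      have hK : (1 : Int) ≤ (k1 : Int) := by exact_mod_cast hk1
      have hsq := pent1_sq k1
      have hseq : s = 6 * (k1 : Int) - 1 :=
        (sqrt_unique (24 * g + 1) s (6 * (k1 : Int) - 1) hs0 hs1 hs2 (by omega)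
          (by rw [hp1]; linarith [hsq])).symm
      have htest : s * s = 24 * g + 1 := by rw [hseq, hp1]; linarith [hsq]
      have hr5 : PySem.Int.mod s 6 = 5 := by rw [hmod, hseq]; omega
      have hfd : PySem.Int.floordiv (s + 1) 6 = (k1 : Int) := by
        rw [PySem.Int.floordiv_eq_ediv_of_pos (by norm_num), hseq]; omega
      have hexp : ((k1 : Int) - 1).toNat = k1 - 1 := by omega
      have hbody : bodyB L n i t = t + (-1 : Int) ^ (k1 - 1) * PySem.List.pyGetD L i 0 := by
        rw [bodyB, ← hgdef, ← hsdef, if_pos htest, if_pos hr5, hfd, hexp]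
      have hne2 : g ≠ pent2 k2 := by
        intro hp2
        have hseq2 : s = 6 * (k2 : Int) + 1 :=
          (sqrt_unique (24 * g + 1) s (6 * (k2 : Int) + 1) hs0 hs1 hs2
            (by positivity) (by rw [hp2]; linarith [pent2_sq k2])).symm
        omega
      have hb1' : pent1 ((k1 + 1) - 1) < n - 1 - (i - 1) := by
        have : (k1 + 1) - 1 = k1 := rfl
        rw [this]; omega
      have hb2' : n - 1 - (i - 1) ≤ pent1 (k1 + 1) := by
        have := pent1_succ k1; omega
      have hb3' : pent2 (k2 - 1) < n - 1 - (i - 1) := by omega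
      have hb4' : n - 1 - (i - 1) ≤ pent2 k2 := by
        rcases lt_or_eq_of_le b4 with h | h
        · omega
        · exact (hne2 h).elim
      rw [hbody, ih (i - 1) (k1 + 1) k2 _ hf' (by omega) hk2 hb1' hb2' hb3' hb4']
      have hpeel : loopA1 L n k1 0
          = (-1 : Int) ^ (k1 - 1) * PySem.List.pyGetD L i 0 + loopA1 L n (k1 + 1) 0 := by
        conv_lhs => rw [loopA1]
        rw [if_pos (by omega), loopA1_acc L n (k1 + 1),
          show n - pent1 k1 - 1 = i by omega]
        ring
      rw [hpeel]; ring
    · have hlt1 : g < pent1 k1 := lt_of_le_of_ne b2 hp1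
      by_cases hp2 : g = pent2 k2
      · -- this index is the k2-th second-family pentagonal term
        have hK : (1 : Int) ≤ (k2 : Int) := by exact_mod_cast hk2
        have hsq := pent2_sq k2
        have hseq : s = 6 * (k2 : Int) + 1 :=
          (sqrt_unique (24 * g + 1) s (6 * (k2 : Int) + 1) hs0 hs1 hs2 (by positivity)
            (by rw [hp2]; linarith [hsq])).symm
        have htest : s * s = 24 * g + 1 := by rw [hseq, hp2]; linarith [hsq]
        have hr1 : PySem.Int.mod s 6 = 1 := by rw [hmod, hseq]; omega
        have hr5 : ¬ PySem.Int.mod s 6 = 5 := by rw [hr1]; norm_num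
        have hfd : PySem.Int.floordiv (s - 1) 6 = (k2 : Int) := by
          rw [PySem.Int.floordiv_eq_ediv_of_pos (by norm_num), hseq]; omega
        have hexp : ((k2 : Int) - 1).toNat = k2 - 1 := by omega
        have hbody : bodyB L n i t = t + (-1 : Int) ^ (k2 - 1) * PySem.List.pyGetD L i 0 := by
          rw [bodyB, ← hgdef, ← hsdef, if_pos htest, if_neg hr5, if_pos hr1, hfd, hexp]
        have hb1' : pent1 (k1 - 1) < n - 1 - (i - 1) := by omega
        have hb2' : n - 1 - (i - 1) ≤ pent1 k1 := by omega
        have hb3' : pent2 ((k2 + 1) - 1) < n - 1 - (i - 1) := by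
          have : (k2 + 1) - 1 = k2 := rfl
          rw [this]; omega
        have hb4' : n - 1 - (i - 1) ≤ pent2 (k2 + 1) := by
          have := pent2_succ k2; omega
        rw [hbody, ih (i - 1) k1 (k2 + 1) _ hf' hk1 (by omega) hb1' hb2' hb3' hb4']
        have hpeel : loopA2 L n k2 0
            = (-1 : Int) ^ (k2 - 1) * PySem.List.pyGetD L i 0 + loopA2 L n (k2 + 1) 0 := by
          conv_lhs => rw [loopA2]
          rw [if_pos (by omega), loopA2_acc L n (k2 + 1),
            show n - pent2 k2 - 1 = i by omega]
          ring
        rw [hpeel]; ring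
      · -- g is not a pentagonal offset: B adds nothing, both A loops are untouched
        have hlt2 : g < pent2 k2 := lt_of_le_of_ne b4 hp2
        have hbody : bodyB L n i t = t := by
          rw [bodyB, ← hgdef, ← hsdef]
          by_cases htest : s * s = 24 * g + 1
          · rw [if_pos htest]
            by_cases hr5 : PySem.Int.mod s 6 = 5
            · exfalso
              have hr5' : s % 6 = 5 := by rw [← hmod]; exact hr5
              set a : Int := (s + 1) / 6 with hadef
              have ha : s = 6 * a - 1 := by omega
              have ha1 : 1 ≤ a := by omega
              have han : ((a.toNat : Int)) = a := by omega
              have hpa : pent1 a.toNat = g := by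
                have := pent1_sq a.toNat
                rw [han] at this
                nlinarith [htest]
              rcases Nat.lt_or_ge a.toNat k1 with hc | hc
              · have : pent1 a.toNat ≤ pent1 (k1 - 1) := pent1_le (by omega)
                omega
              · have : pent1 k1 ≤ pent1 a.toNat := pent1_le hc
                omega
            · rw [if_neg hr5]
              by_cases hr1 : PySem.Int.mod s 6 = 1
              · exfalso
                have hr1' : s % 6 = 1 := by rw [← hmod]; exact hr1
                set a : Int := (s - 1) / 6 with hadef
                have ha : s = 6 * a + 1 := by omega
                have ha1 : 1 ≤ a := by omega
                have han : ((a.toNat : Int)) = a := by omega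
                have hpa : pent2 a.toNat = g := by
                  have := pent2_sq a.toNat
                  rw [han] at this
                  nlinarith [htest]
                rcases Nat.lt_or_ge a.toNat k2 with hc | hc
                · have : pent2 a.toNat ≤ pent2 (k2 - 1) := pent2_le (by omega)
                  omega
                · have : pent2 k2 ≤ pent2 a.toNat := pent2_le hc
                  omega
              · rw [if_neg hr1]
          · rw [if_neg htest]
        rw [hbody]
        exact ih (i - 1) k1 k2 t hf' hk1 hk2 (by omega) (by omega) (by omega) (by omega)

-- ===== VERDICT (by name: the statement is the Claim_ definition above) =====
theorem calculateNext_spec : Claim_equal_calculateNext := by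
  intro L n _ _
  unfold Spec_calculateNext calculateNext calculateNext_alt
  have h10 : pent1 0 = 0 := by decide
  have h11 : pent1 1 = 1 := by decide
  have h20 : pent2 0 = 0 := by decide
  have h21 : pent2 1 = 2 := by decide
  rw [loopA2_acc, loopB_eq L n (n + 1).toNat (n - 2) 1 1 0 (by omega) le_rfl le_rfl
    (by simp only [Nat.sub_self, h10]; omega) (by simp only [h11]; omega)
    (by simp only [Nat.sub_self, h20]; omega) (by simp only [h21]; omega)]
  ring
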